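-- pv_equiv track=rewrite | github.com/Gioele-M/biospyder_app | assets/functions.py | gc_subsequence
-- ===== SOURCE A (Python) =====
-- def gc_subsequence(seq):
--     highest_subseq = ''
--     highest_content = 0
--     pos = 0
--     for x in range(len(seq)-9):
--         subseq = seq[x:x+10]
--         gc_content = subseq.count('G') + subseq.count('C')
--         if gc_content > highest_content:
--             highest_content = gc_content
--             highest_subseq = subseq
--             pos = x
--     if highest_content == 0:
--         return 'This sequence has no G or C', 0, 0
--     return highest_subseq, highest_content, pos
-- ===== SOURCE B (Python) =====
-- def gc_subsequence(seq):
--     # Prefix-sum table: pre[i] = number of 'G'/'C' among seq[:i]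
--     pre = [0]
--     for ch in seq:
--         pre.append(pre[-1] + (1 if (ch == 'G' or ch == 'C') else 0))
--     highest_subseq = ''
--     highest_content = 0
--     pos = 0
--     for x in range(len(seq) - 9):
--         gc_content = pre[x + 10] - pre[x]
--         if gc_content > highest_content:
--             highest_content = gc_content
--             highest_subseq = seq[x:x + 10]
--             pos = x
--     if highest_content == 0:
--         return 'This sequence has no G or C', 0, 0
--     return highest_subseq, highest_content, pos
-- ===== Notes on version B (the rewrite author's own statement) =====
-- stated objective: faster
-- what changed: Replaces per-window rescanning (slice + two count() passes per position) with a prefix-sum table of G/C counts built once, so each window's GC content is a single subtraction.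
import Mathlib
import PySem

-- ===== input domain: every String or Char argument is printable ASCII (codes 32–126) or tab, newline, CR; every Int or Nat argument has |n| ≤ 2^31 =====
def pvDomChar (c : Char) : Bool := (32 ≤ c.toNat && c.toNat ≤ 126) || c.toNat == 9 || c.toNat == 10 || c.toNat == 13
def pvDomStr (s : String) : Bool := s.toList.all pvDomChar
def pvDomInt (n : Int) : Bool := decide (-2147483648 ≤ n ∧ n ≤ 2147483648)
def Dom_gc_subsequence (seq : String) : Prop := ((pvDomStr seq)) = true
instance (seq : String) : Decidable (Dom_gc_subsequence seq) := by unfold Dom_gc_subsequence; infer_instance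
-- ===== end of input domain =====

-- B replaces A's per-window slice-and-count with a prefix-sum table of G/C counts built once
-- (objective: faster, constant-factor — each window becomes one subtraction). Return values agree on all inputs.

-- ===== PORT A =====
-- literal transliteration of A: for each window start x, slice out seq[x:x+10] and count 'G' and 'C' in it
def gc_subsequence (seq : String) : String × Int × Int :=
  let cs := seq.toList
  let st := (PySem.List.pyRange 0 ((cs.length : Int) - 9) 1).foldl
    (fun (acc : List Char × Int × Int) x =>
      let subseq := PySem.List.slice cs (some x) (some (x + 10))
      let gc_content : Int := (PySem.Chars.count subseq ['G'] : Int) + (PySem.Chars.count subseq ['C'] : Int)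
      if gc_content > acc.2.1 then (subseq, gc_content, x) else acc)
    (([] : List Char), (0 : Int), (0 : Int))
  if st.2.1 = 0 then ("This sequence has no G or C", 0, 0)
  else (String.ofList st.1, st.2.1, st.2.2)

-- ===== PORT B =====
-- literal transliteration of B: build the prefix table pre (pre[i] = G/C count of seq[:i]), then one subtraction per window
def gc_subsequence_alt (seq : String) : String × Int × Int :=
  let cs := seq.toList
  let pre : List Int := cs.foldl
    (fun pre ch => pre ++ [PySem.List.pyGetD pre (-1) 0 + (if ch = 'G' ∨ ch = 'C' then 1 else 0)])
    [(0 : Int)]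
  let st := (PySem.List.pyRange 0 ((cs.length : Int) - 9) 1).foldl
    (fun (acc : List Char × Int × Int) x =>
      let gc_content : Int := PySem.List.pyGetD pre (x + 10) 0 - PySem.List.pyGetD pre x 0
      if gc_content > acc.2.1 then (PySem.List.slice cs (some x) (some (x + 10)), gc_content, x) else acc)
    (([] : List Char), (0 : Int), (0 : Int))
  if st.2.1 = 0 then ("This sequence has no G or C", 0, 0)
  else (String.ofList st.1, st.2.1, st.2.2)

-- ===== PRECONDITION & SPEC =====
def Spec_gc_subsequence (seq : String) (out : String × Int × Int) : Prop := out = gc_subsequence_alt seq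
instance (seq : String) (out : String × Int × Int) : Decidable (Spec_gc_subsequence seq out) := by unfold Spec_gc_subsequence; infer_instance

-- ===== CLAIM (what is proved, stated in full; the proofs are below) =====
def Claim_equal_gc_subsequence : Prop := ∀ (seq : String), Dom_gc_subsequence seq → Spec_gc_subsequence seq (gc_subsequence seq)

-- ===== LEMMAS AND PROOFS =====

-- number of G/C characters, as an Int
def gcCnt (ds : List Char) : Int := (ds.count 'G' : Int) + (ds.count 'C' : Int)

-- Chars.count with a single-character needle is the element count (specialises the fuelled substring counter)
theorem go_single (c : Char) : ∀ (fuel : Nat) (l : List Char) (acc : Nat), l.length ≤ fuel →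
    PySem.Chars.count.go [c] fuel l acc = acc + l.count c := by
  intro fuel
  induction fuel with
  | zero => intro l acc h; simp at h; simp [h, PySem.Chars.count.go]
  | succ n ih =>
    intro l acc h
    cases l with
    | nil => simp [PySem.Chars.count.go]
    | cons a t =>
      have hstep : PySem.Chars.count.go [c] (n+1) (a::t) acc =
          if ([c] : List Char).isPrefixOf (a::t) then PySem.Chars.count.go [c] n (List.drop 1 (a::t)) (acc+1)
          else PySem.Chars.count.go [c] n t acc := rfl
      rw [hstep]
      simp only [List.isPrefixOf, List.drop]
      by_cases hc : a = c
      · simp [hc, ih t (acc + 1) (by simpa using h)]; omega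
      · have hbe : (c == a) = false := by simp; exact fun h' => hc h'.symm
        simp [hbe, ih t acc (by simpa using h), hc]

theorem count_single (cs : List Char) (c : Char) : PySem.Chars.count cs [c] = cs.count c := by
  simp [PySem.Chars.count, go_single c cs.length cs 0 le_rfl]

theorem gcCnt_append (a b : List Char) : gcCnt (a ++ b) = gcCnt a + gcCnt b := by
  simp [gcCnt, List.count_append]; ring

-- B's prefix table is the map of gcCnt over prefixes
theorem pre_eq (cs : List Char) :
    cs.foldl (fun pre ch => pre ++ [PySem.List.pyGetD pre (-1) 0 + (if ch = 'G' ∨ ch = 'C' then 1 else 0)]) [(0 : Int)]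
      = (List.range (cs.length + 1)).map (fun k => gcCnt (cs.take k)) := by
  induction cs using List.reverseRecOn with
  | nil => simp [gcCnt]
  | append_singleton ds c ih =>
    rw [List.foldl_append, ih]
    have hlen : ((List.range (ds.length + 1)).map (fun k => gcCnt (ds.take k))).length = ds.length + 1 := by simp
    have hlast : PySem.List.pyGetD ((List.range (ds.length + 1)).map (fun k => gcCnt (ds.take k))) (-1) 0
        = gcCnt ds := by
      rw [show ((-1 : Int)) = -OfNat.ofNat 1 from rfl,
        PySem.List.pyGetD_neg_ofNat _ 1 0 (by omega) (by omega)]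
      simp
    simp only [List.foldl_cons, List.foldl_nil, hlast]
    have hl2 : (ds ++ [c]).length + 1 = (ds.length + 1) + 1 := by simp
    conv_rhs => rw [hl2, List.range_succ, List.map_append]
    congr 1
    · apply List.map_congr_left
      intro k hk
      rw [List.mem_range] at hk
      rw [List.take_append_of_le_length (by omega)]
    · have htake : List.take (ds.length + 1) (ds ++ [c]) = ds ++ [c] :=
        List.take_of_length_le (by simp)
      simp only [List.map_cons, List.map_nil, htake, gcCnt_append]
      simp [gcCnt]
      split <;> rename_i hgc
      · rcases hgc with h | h <;> simp [h]
      · push Not at hgc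
        simp [hgc.1, hgc.2]

-- the per-window values agree: prefix-difference = count in the slice
theorem window_eq (cs : List Char) (x : Int) (hx0 : 0 ≤ x) (hx : x < (cs.length : Int) - 9) :
    PySem.List.pyGetD ((List.range (cs.length + 1)).map (fun k => gcCnt (cs.take k))) (x + 10) 0
      - PySem.List.pyGetD ((List.range (cs.length + 1)).map (fun k => gcCnt (cs.take k))) x 0
    = (PySem.Chars.count (PySem.List.slice cs (some x) (some (x + 10))) ['G'] : Int)
      + (PySem.Chars.count (PySem.List.slice cs (some x) (some (x + 10))) ['C'] : Int) := by
  have h10 : (x + 10).toNat = x.toNat + 10 := by omega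
  rw [PySem.List.pyGetD_of_nonneg _ _ (by omega), PySem.List.pyGetD_of_nonneg _ _ hx0,
    PySem.List.getD_map_range _ _ _ _ (by omega), PySem.List.getD_map_range _ _ _ _ (by omega),
    PySem.List.slice_toNat cs hx0 (by omega), count_single, count_single, h10]
  have hsplit : cs.take (x.toNat + 10) = cs.take x.toNat ++ (cs.drop x.toNat).take 10 := by
    rw [← List.take_add]
  have := gcCnt_append (cs.take x.toNat) ((cs.drop x.toNat).take 10)
  rw [hsplit, this]
  simp [gcCnt]

-- ===== VERDICT (by name: the statement is the Claim_ definition above) =====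
theorem gc_subsequence_spec : Claim_equal_gc_subsequence := by
  intro seq _
  unfold Spec_gc_subsequence gc_subsequence gc_subsequence_alt
  simp only [pre_eq]
  rw [PySem.List.foldl_congr_mem]
  intro acc x hx
  rw [PySem.List.mem_pyRange_one] at hx
  rw [window_eq seq.toList x hx.1 hx.2]
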